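-- pv_equiv track=rewrite | github.com/wqyeo/WeissCost | src/yuyutei_scraper.py | _id_matches
-- ===== SOURCE A (Python) =====
-- def _id_matches(targetID:str, givenID:str) -> bool:
--     possible = ["SPb", "SPa", "S", "R", "SSP", "SPm", "SP", "SPMb", "SPMa"]
--     if targetID == givenID:
--         return True
--
--     # Match against all possible rarity:
--     for possibleRarity in possible:
--         if (targetID + possibleRarity) == givenID:
--             return True
--     return False
-- ===== SOURCE B (Python) =====
-- # Table-driven DFA: check the prefix, then run a hand-built automaton over the
-- # remaining characters instead of constructing and comparing candidate strings.
-- _DELTA = {(0, 'S'): 1, (0, 'R'): 2, (1, 'P'): 3, (1, 'S'): 4,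
--           (3, 'b'): 5, (3, 'a'): 5, (3, 'm'): 5, (3, 'M'): 6,
--           (4, 'P'): 7, (6, 'b'): 8, (6, 'a'): 8}
-- _ACCEPT = {0, 1, 2, 3, 5, 7, 8}
--
-- def _id_matches(targetID: str, givenID: str) -> bool:
--     n = len(targetID)
--     if givenID[:n] != targetID:
--         return False
--     state = 0
--     for ch in givenID[n:]:
--         nxt = _DELTA.get((state, ch))
--         if nxt is None:
--             return False
--         state = nxt
--     return state in _ACCEPT
-- ===== Notes on version B (the rewrite author's own statement) =====
-- stated objective: alternative
-- what changed: Replaces the loop that builds each candidate string targetID+rarity and compares it to givenID with a prefix check followed by running a hand-built table-driven DFA (transition dict + accepting-state set) over the remaining characters.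
import Mathlib
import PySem

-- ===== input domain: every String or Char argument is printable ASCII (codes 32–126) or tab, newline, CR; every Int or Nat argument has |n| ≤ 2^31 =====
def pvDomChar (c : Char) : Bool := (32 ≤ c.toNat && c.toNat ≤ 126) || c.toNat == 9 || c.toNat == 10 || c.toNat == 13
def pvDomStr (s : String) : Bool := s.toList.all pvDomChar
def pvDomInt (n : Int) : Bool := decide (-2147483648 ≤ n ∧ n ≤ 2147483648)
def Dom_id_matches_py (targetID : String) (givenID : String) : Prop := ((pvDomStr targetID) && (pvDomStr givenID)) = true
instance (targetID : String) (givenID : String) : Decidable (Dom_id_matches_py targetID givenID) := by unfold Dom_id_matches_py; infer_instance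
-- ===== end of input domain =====

-- B replaces A's candidate-building loop with a prefix check followed by a hand-built
-- table-driven DFA run over the remaining characters (objective: alternative).

-- ===== PORT A =====
-- Python string concatenation ported exactly as list-of-code-points concatenation.
def id_matches_py (targetID : String) (givenID : String) : Bool :=
  let possible : List String := ["SPb", "SPa", "S", "R", "SSP", "SPm", "SP", "SPMb", "SPMa"]
  if targetID == givenID then true
  else
    -- the for-loop with early 'return True' is the first-match scan List.any
    possible.any (fun possibleRarity =>
      String.ofList (targetID.toList ++ possibleRarity.toList) == givenID)

-- ===== PORT B =====
def dfaDelta : PySem.Dict (Int × Char) Int :=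
  PySem.Dict.ofList [((0, 'S'), 1), ((0, 'R'), 2), ((1, 'P'), 3), ((1, 'S'), 4),
    ((3, 'b'), 5), ((3, 'a'), 5), ((3, 'm'), 5), ((3, 'M'), 6),
    ((4, 'P'), 7), ((6, 'b'), 8), ((6, 'a'), 8)]

def dfaAccept : PySem.Set Int := PySem.Set.ofList [0, 1, 2, 3, 5, 7, 8]

-- the for-loop with early 'return False' over givenID[n:] as structural recursion on the chars
def idRunDFA : Int → List Char → Bool
  | state, [] => dfaAccept.contains state
  | state, ch :: rest =>
    match dfaDelta.get? (state, ch) with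
    | none => false
    | some nxt => idRunDFA nxt rest

def id_matches_py_alt (targetID : String) (givenID : String) : Bool :=
  let n := PySem.Str.len targetID
  if !(PySem.Str.slice givenID none (some n) == targetID) then false
  else idRunDFA 0 (PySem.Str.slice givenID (some n) none).toList

-- ===== PRECONDITION & SPEC =====
def Spec_id_matches_py (targetID : String) (givenID : String) (out : Bool) : Prop := out = id_matches_py_alt targetID givenID
instance (targetID : String) (givenID : String) (out : Bool) : Decidable (Spec_id_matches_py targetID givenID out) := by unfold Spec_id_matches_py; infer_instance

-- ===== CLAIM (what is proved, stated in full; the proofs are below) =====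
def Claim_equal_id_matches_py : Prop := ∀ (targetID : String) (givenID : String), Dom_id_matches_py targetID givenID → Spec_id_matches_py targetID givenID (id_matches_py targetID givenID)

-- ===== LEMMAS AND PROOFS =====

-- the literal transition dict, in mk form for get?_mk_cons
theorem dfaDelta_mk : dfaDelta = PySem.Dict.mk [((0, 'S'), 1), ((0, 'R'), 2), ((1, 'P'), 3), ((1, 'S'), 4),
    ((3, 'b'), 5), ((3, 'a'), 5), ((3, 'm'), 5), ((3, 'M'), 6),
    ((4, 'P'), 7), ((6, 'b'), 8), ((6, 'a'), 8)] := by decide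


-- get? on the empty literal dict
theorem get?_nil_dict {κ ν : Type} [BEq κ] (x : κ) :
    (PySem.Dict.mk ([] : List (κ × ν))).get? x = none := by
  simp [PySem.Dict.get?]

-- runs from the states with no outgoing transition
theorem run_final (s : Int) (hs : s = 2 ∨ s = 5 ∨ s = 7 ∨ s = 8) :
    ∀ d : List Char, idRunDFA s d = decide (d = []) := by
  intro d
  cases d with
  | nil => rcases hs with h|h|h|h <;> subst h <;> decide
  | cons c r =>
    have : dfaDelta.get? (s, c) = none := by
      rw [dfaDelta_mk]
      rcases hs with h|h|h|h <;> subst h <;>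
        simp [PySem.Dict.get?_mk_cons, get?_nil_dict]
    simp [idRunDFA, this]

theorem run6 : ∀ d : List Char, idRunDFA 6 d = decide (d = ['b'] ∨ d = ['a']) := by
  intro d
  cases d with
  | nil => decide
  | cons c r =>
    by_cases hb : 'b' = c
    · subst hb
      simp [idRunDFA, dfaDelta_mk, PySem.Dict.get?_mk_cons, run_final 8 (by norm_num)]
    · by_cases ha : 'a' = c
      · subst ha
        simp [idRunDFA, dfaDelta_mk, PySem.Dict.get?_mk_cons, run_final 8 (by norm_num)]
      · have hb' : c ≠ 'b' := fun h => hb h.symm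
        have ha' : c ≠ 'a' := fun h => ha h.symm
        simp [idRunDFA, dfaDelta_mk, PySem.Dict.get?_mk_cons, get?_nil_dict, hb, ha, hb', ha']

theorem run4 : ∀ d : List Char, idRunDFA 4 d = decide (d = ['P']) := by
  intro d
  cases d with
  | nil => decide
  | cons c r =>
    by_cases hp : 'P' = c
    · subst hp
      simp [idRunDFA, dfaDelta_mk, PySem.Dict.get?_mk_cons, run_final 7 (by norm_num)]
    · have hp' : c ≠ 'P' := fun h => hp h.symm
      simp [idRunDFA, dfaDelta_mk, PySem.Dict.get?_mk_cons, get?_nil_dict, hp, hp']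

theorem run3 : ∀ d : List Char, idRunDFA 3 d =
    decide (d = [] ∨ d = ['b'] ∨ d = ['a'] ∨ d = ['m'] ∨ d = ['M', 'b'] ∨ d = ['M', 'a']) := by
  intro d
  cases d with
  | nil => decide
  | cons c r =>
    by_cases hb : 'b' = c
    · subst hb
      simp [idRunDFA, dfaDelta_mk, PySem.Dict.get?_mk_cons, run_final 5 (by norm_num)]
    · by_cases ha : 'a' = c
      · subst ha
        simp [idRunDFA, dfaDelta_mk, PySem.Dict.get?_mk_cons, run_final 5 (by norm_num)]
      · by_cases hm : 'm' = c
        · subst hm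
          simp [idRunDFA, dfaDelta_mk, PySem.Dict.get?_mk_cons, run_final 5 (by norm_num)]
        · by_cases hM : 'M' = c
          · subst hM
            simp [idRunDFA, dfaDelta_mk, PySem.Dict.get?_mk_cons, run6]
          · have hb' : c ≠ 'b' := fun h => hb h.symm
            have ha' : c ≠ 'a' := fun h => ha h.symm
            have hm' : c ≠ 'm' := fun h => hm h.symm
            have hM' : c ≠ 'M' := fun h => hM h.symm
            simp [idRunDFA, dfaDelta_mk, PySem.Dict.get?_mk_cons, get?_nil_dict,
              hb, ha, hm, hM, hb', ha', hm', hM']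

theorem run1 : ∀ d : List Char, idRunDFA 1 d =
    decide (d = [] ∨ d = ['P'] ∨ d = ['P', 'b'] ∨ d = ['P', 'a'] ∨ d = ['P', 'm'] ∨
      d = ['P', 'M', 'b'] ∨ d = ['P', 'M', 'a'] ∨ d = ['S', 'P']) := by
  intro d
  cases d with
  | nil => decide
  | cons c r =>
    by_cases hp : 'P' = c
    · subst hp
      simp [idRunDFA, dfaDelta_mk, PySem.Dict.get?_mk_cons, run3]
    · by_cases hs : 'S' = c
      · subst hs
        simp [idRunDFA, dfaDelta_mk, PySem.Dict.get?_mk_cons, run4]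
      · have hp' : c ≠ 'P' := fun h => hp h.symm
        have hs' : c ≠ 'S' := fun h => hs h.symm
        simp [idRunDFA, dfaDelta_mk, PySem.Dict.get?_mk_cons, get?_nil_dict, hp, hs, hp', hs']

theorem run0 : ∀ d : List Char, idRunDFA 0 d =
    decide (d = [] ∨ d = ['S', 'P', 'b'] ∨ d = ['S', 'P', 'a'] ∨ d = ['S'] ∨
      d = ['R'] ∨ d = ['S', 'S', 'P'] ∨ d = ['S', 'P', 'm'] ∨ d = ['S', 'P'] ∨
      d = ['S', 'P', 'M', 'b'] ∨ d = ['S', 'P', 'M', 'a']) := by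
  intro d
  cases d with
  | nil => decide
  | cons c r =>
    by_cases hs : 'S' = c
    · subst hs
      simp [idRunDFA, dfaDelta_mk, PySem.Dict.get?_mk_cons, run1]
      rw [Bool.eq_iff_iff]
      simp only [Bool.or_eq_true, decide_eq_true_eq]
      tauto
    · by_cases hr : 'R' = c
      · subst hr
        simp [idRunDFA, dfaDelta_mk, PySem.Dict.get?_mk_cons, run_final 2 (by norm_num)]
      · have hs' : c ≠ 'S' := fun h => hs h.symm
        have hr' : c ≠ 'R' := fun h => hr h.symm
        simp [idRunDFA, dfaDelta_mk, PySem.Dict.get?_mk_cons, get?_nil_dict, hs, hr, hs', hr']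

theorem main_eq (t : String) (g : String) :
    id_matches_py t g = id_matches_py_alt t g := by
  unfold id_matches_py id_matches_py_alt
  by_cases hp : t.toList <+: g.toList
  · obtain ⟨d, hd⟩ := hp
    have hcond : (PySem.Str.slice g none (some (PySem.Str.len t)) == t) = true := by
      rw [beq_iff_eq, ← String.toList_inj, PySem.Str.toList_slice,
        PySem.Chars.slice_eq_listSlice, PySem.Str.len_eq,
        PySem.List.slice_to_natCast, ← hd, List.take_left]
    have hdrop : (PySem.Str.slice g (some (PySem.Str.len t)) none).toList = d := by
      rw [PySem.Str.toList_slice, PySem.Chars.slice_eq_listSlice, PySem.Str.len_eq,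
        PySem.List.slice_from g.toList (Int.natCast_nonneg _), Int.toNat_natCast,
        ← hd, List.drop_left]
    have hmk : ∀ r : String, ((String.ofList (t.toList ++ r.toList) == g) = true) ↔ d = r.toList := by
      intro r
      rw [beq_iff_eq, ← String.toList_inj, String.toList_ofList, ← hd,
        List.append_right_inj, eq_comm]
    have htg : ((t == g) = true) ↔ d = [] := by
      rw [beq_iff_eq, ← String.toList_inj, ← hd, List.self_eq_append_right]
    simp only [hcond, Bool.not_true, Bool.false_eq_true, if_false, hdrop, run0]
    by_cases hdnil : d = []
    · simp [htg.mpr hdnil, hdnil]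
    · have htg' : (t == g) = false := by
        rcases Bool.eq_false_or_eq_true (t == g) with h | h
        · exact absurd (htg.mp h) hdnil
        · exact h
      rw [htg']
      simp only [Bool.false_eq_true, if_false]
      rw [Bool.eq_iff_iff]
      simp only [List.any_eq_true, decide_eq_true_eq, hmk]
      simp only [List.mem_cons, List.not_mem_nil, or_false, hdnil, false_or]
      constructor
      · rintro ⟨x, hx, hdx⟩
        rcases hx with h|h|h|h|h|h|h|h|h <;> subst h <;> subst hdx <;> simp
      · rintro (h|h|h|h|h|h|h|h|h) <;> subst h
        · exact ⟨"SPb", by simp, by decide⟩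
        · exact ⟨"SPa", by simp, by decide⟩
        · exact ⟨"S", by simp, by decide⟩
        · exact ⟨"R", by simp, by decide⟩
        · exact ⟨"SSP", by simp, by decide⟩
        · exact ⟨"SPm", by simp, by decide⟩
        · exact ⟨"SP", by simp, by decide⟩
        · exact ⟨"SPMb", by simp, by decide⟩
        · exact ⟨"SPMa", by simp, by decide⟩
  · have hcond : (PySem.Str.slice g none (some (PySem.Str.len t)) == t) = false := by
      rw [beq_eq_false_iff_ne]
      intro e
      apply hp
      rw [← String.toList_inj, PySem.Str.toList_slice, PySem.Chars.slice_eq_listSlice,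
        PySem.Str.len_eq, PySem.List.slice_to_natCast] at e
      exact e ▸ List.take_prefix _ _
    have htg : (t == g) = false := by
      rw [beq_eq_false_iff_ne]
      intro e
      exact hp (e ▸ List.prefix_refl _)
    simp only [hcond, htg, Bool.not_false, if_true, Bool.false_eq_true, if_false]
    rw [List.any_eq_false]
    intro r _
    rw [beq_iff_eq]
    intro e
    have h2 := congrArg String.toList e
    rw [String.toList_ofList] at h2
    exact hp ⟨r.toList, h2⟩

-- ===== VERDICT (by name: the statement is the Claim_ definition above) =====
theorem id_matches_py_spec : Claim_equal_id_matches_py := by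
  intro t g _
  exact main_eq t g
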